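-- pv_equiv track=rewrite | github.com/Blackoutburst/unholyc | uhc.py | _replace_namespace_dots
-- ===== SOURCE A (Python) =====
-- def _replace_namespace_dots(line: str) -> str:
--     """
--     Replace  UppercaseName.identifier  with  UppercaseName::identifier
--     inside a single source line, skipping string literals and // comments.
--     """
--     result: list[str] = []
--     i = 0
--     n = len(line)
--
--     while i < n:
--         ch = line[i]
--
--         # -- Line comment: copy the rest verbatim
--         if ch == '/' and i + 1 < n and line[i + 1] == '/':
--             result.append(line[i:])
--             break
--
--         # -- String / char literals: copy verbatim
--         if ch in ('"', "'"):
--             quote = ch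
--             result.append(ch)
--             i += 1
--             while i < n:
--                 c = line[i]
--                 result.append(c)
--                 if c == '\\':          # escaped character
--                     i += 1
--                     if i < n:
--                         result.append(line[i])
--                 elif c == quote:
--                     break
--                 i += 1
--             i += 1
--             continue
--
--         # -- Uppercase identifier: possible namespace qualifier
--         if ch.isupper():
--             j = i
--             while j < n and (line[j].isalnum() or line[j] == '_'):
--                 j += 1
--             ident = line[i:j]
--
--             # Followed by '.' and then alpha/underscore  ->  namespace access
--             # but only if the member name is not snake_case (no underscores),
--             # which would indicate a C struct field rather than a namespace member.
--             if (j < n and line[j] == '.'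
--                     and j + 1 < n
--                     and (line[j + 1].isalpha() or line[j + 1] == '_')):
--                 k = j + 1
--                 while k < n and (line[k].isalnum() or line[k] == '_'):
--                     k += 1
--                 member = line[j + 1:k]
--                 if '_' not in member or member[0].isupper():
--                     result.append(ident + '::')
--                     i = j + 1          # skip the dot
--                     continue
--
--             result.append(ident)
--             i = j
--             continue
--
--         result.append(ch)
--         i += 1
--
--     return ''.join(result)
-- ===== SOURCE B (Python) =====
-- def _replace_namespace_dots(line: str) -> str:
--     # Two-pass: tokenize the line into ('word', run) and ('other', text) tokens
--     # (string/char literals and // comments become verbatim 'other' tokens),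
--     # then rewrite the token stream: word '.' word -> word '::' word when the
--     # left word contains an uppercase letter and the member qualifies.
--     def word_char(c):
--         return c.isalnum() or c == '_'
--
--     toks = []
--     i, n = 0, len(line)
--     while i < n:
--         ch = line[i]
--         if ch == '/' and i + 1 < n and line[i + 1] == '/':
--             toks.append(('other', line[i:]))
--             break
--         if ch in '"\'':
--             j = i + 1
--             while j < n:
--                 if line[j] == '\\':
--                     j += 2
--                 elif line[j] == ch:
--                     j += 1
--                     break
--                 else:
--                     j += 1
--             toks.append(('other', line[i:j]))
--             i = j
--             continue
--         if word_char(ch):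
--             j = i
--             while j < n and word_char(line[j]):
--                 j += 1
--             toks.append(('word', line[i:j]))
--             i = j
--             continue
--         toks.append(('other', ch))
--         i += 1
--
--     out = []
--     t = 0
--     while t < len(toks):
--         kind, s = toks[t]
--         if (kind == 'word' and t + 2 < len(toks)
--                 and toks[t + 1] == ('other', '.')
--                 and toks[t + 2][0] == 'word'):
--             m = toks[t + 2][1]
--             if (any(c.isupper() for c in s)
--                     and (m[0].isalpha() or m[0] == '_')
--                     and ('_' not in m or m[0].isupper())):
--                 out.append(s + '::')
--                 t += 2
--                 continue
--         out.append(s)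
--         t += 1
--     return ''.join(out)
-- ===== Notes on version B (the rewrite author's own statement) =====
-- stated objective: alternative
-- what changed: A is a fused single-pass scanner that rewrites while walking the line character by character; B first tokenizes the line into word/literal/comment/other tokens and then rewrites the token stream, replacing word '.' word by word '::' word when the left word contains an uppercase letter and the member qualifies.
import Mathlib
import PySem

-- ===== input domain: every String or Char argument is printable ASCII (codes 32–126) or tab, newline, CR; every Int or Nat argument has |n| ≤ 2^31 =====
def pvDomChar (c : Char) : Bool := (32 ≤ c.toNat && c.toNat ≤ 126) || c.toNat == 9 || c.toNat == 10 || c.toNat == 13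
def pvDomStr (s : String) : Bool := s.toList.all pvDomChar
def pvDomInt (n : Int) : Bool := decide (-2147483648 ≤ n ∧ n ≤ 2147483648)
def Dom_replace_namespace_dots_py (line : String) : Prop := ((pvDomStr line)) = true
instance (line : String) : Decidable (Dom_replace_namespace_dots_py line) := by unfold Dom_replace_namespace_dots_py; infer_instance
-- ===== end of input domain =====

-- B replaces A's fused single-pass scanner by a two-pass tokenize-then-rewrite
-- decomposition (same cost, alternative structure); return values are equal.

-- shared ASCII character classes (Python's str.isupper/isalpha/isalnum on the ASCII domain)
def pvUpper (c : Char) : Bool := 'A' ≤ c && c ≤ 'Z'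
def pvLower (c : Char) : Bool := 'a' ≤ c && c ≤ 'z'
def pvAlpha (c : Char) : Bool := pvUpper c || pvLower c
def pvDigit (c : Char) : Bool := '0' ≤ c && c ≤ '9'
def pvAlnum (c : Char) : Bool := pvAlpha c || pvDigit c
def pvWordC (c : Char) : Bool := pvAlnum c || c = '_'

theorem pvUpper_wordC (c : Char) (h : pvUpper c = true) : pvWordC c = true := by
  simp [pvWordC, pvAlnum, pvAlpha, h]

theorem pv_drop_le (ch : Char) (rest : List Char) (h : pvWordC ch = true) :
    ((ch :: rest).dropWhile pvWordC).length ≤ rest.length := by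
  rw [List.dropWhile_cons_of_pos h]; exact (List.dropWhile_sublist _).length_le

-- ===== PORT A =====
-- A's inner string-literal loop: returns (chars copied verbatim, remainder after the literal)
def pvALit (q : Char) : List Char → List Char × List Char
  | [] => ([], [])
  | c :: cs =>
    if c = '\\' then
      match cs with
      | [] => ([c], [])
      | d :: ds => ((c :: d :: (pvALit q ds).1), (pvALit q ds).2)
    else if c = q then ([c], cs)
    else ((c :: (pvALit q cs).1), (pvALit q cs).2)

theorem pvALit_snd_le (q : Char) (cs : List Char) : (pvALit q cs).2.length ≤ cs.length := by
  fun_induction pvALit q cs <;> simp_all <;> omega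

-- A's main while-loop, as structural recursion over the remaining characters
def pvAGo : List Char → List Char
  | [] => []
  | ch :: rest =>
    if ch = '/' && rest.head? == some '/' then
      ch :: rest
    else if ch = '"' || ch = '\'' then
      ch :: (pvALit ch rest).1 ++ pvAGo (pvALit ch rest).2
    else if hup : pvUpper ch then
      match _h : List.dropWhile pvWordC (ch :: rest) with
      | '.' :: m1 :: ms =>
        if pvAlpha m1 || m1 = '_' then
          if !((m1 :: ms).takeWhile pvWordC).contains '_'
              || pvUpper (((m1 :: ms).takeWhile pvWordC).headD ' ') then
            (ch :: rest).takeWhile pvWordC ++ [':', ':'] ++ pvAGo (m1 :: ms)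
          else (ch :: rest).takeWhile pvWordC ++ pvAGo ('.' :: m1 :: ms)
        else (ch :: rest).takeWhile pvWordC ++ pvAGo ('.' :: m1 :: ms)
      | other => (ch :: rest).takeWhile pvWordC ++ pvAGo other
    else ch :: pvAGo rest
termination_by l => l.length
decreasing_by
  · have := pvALit_snd_le ch rest; simp; omega
  all_goals
    first
    | (have h1 := pv_drop_le ch rest (pvUpper_wordC ch hup)
       rw [_h] at h1; simp at h1 ⊢; omega)
    | simp

def replace_namespace_dots_py (line : String) : String := String.mk (pvAGo line.toList)

-- ===== PORT B =====
inductive PvTok where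
  | word : List Char → PvTok
  | other : List Char → PvTok
deriving DecidableEq, Repr

-- B's literal scanner: number of characters the literal occupies after the opening quote
def pvBLitLen (q : Char) : List Char → Nat
  | [] => 0
  | c :: cs =>
    if c = '\\' then
      match cs with
      | [] => 2
      | _ :: ds => 2 + pvBLitLen q ds
    else if c = q then 1
    else 1 + pvBLitLen q cs

-- B pass 1: tokenize
def pvBTokenize : List Char → List PvTok
  | [] => []
  | ch :: rest =>
    if ch = '/' && rest.head? == some '/' then
      [.other (ch :: rest)]
    else if ch = '"' || ch = '\'' then
      .other (ch :: rest.take (pvBLitLen ch rest)) :: pvBTokenize (rest.drop (pvBLitLen ch rest))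
    else if hw : pvWordC ch then
      .word ((ch :: rest).takeWhile pvWordC) :: pvBTokenize ((ch :: rest).dropWhile pvWordC)
    else .other [ch] :: pvBTokenize rest
termination_by l => l.length
decreasing_by
  · simp [List.length_drop]; try omega
  · have := pv_drop_le ch rest hw; simp at this ⊢; omega
  · simp

def pvHasUpper (w : List Char) : Bool := w.any pvUpper
def pvMemberOk (m : List Char) : Bool :=
  (pvAlpha (m.headD ' ') || m.headD ' ' = '_') && (!m.contains '_' || pvUpper (m.headD ' '))

-- B pass 2: rewrite word '.' word into word '::' word where it qualifies
def pvBRewrite : List PvTok → List Char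
  | [] => []
  | .other s :: ts => s ++ pvBRewrite ts
  | .word w :: ts =>
    match _h : ts with
    | .other ['.'] :: .word m :: ts' =>
      if pvHasUpper w && pvMemberOk m then w ++ [':', ':'] ++ pvBRewrite (.word m :: ts')
      else w ++ pvBRewrite ts
    | _ => w ++ pvBRewrite ts
termination_by l => l.length
decreasing_by all_goals (try rw [_h]) <;> simp <;> omega

def replace_namespace_dots_py_alt (line : String) : String :=
  String.mk (pvBRewrite (pvBTokenize line.toList))


-- ===== PRECONDITION & SPEC =====
def Spec_replace_namespace_dots_py (line : String) (out : String) : Prop := out = replace_namespace_dots_py_alt line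
instance (line : String) (out : String) : Decidable (Spec_replace_namespace_dots_py line out) := by unfold Spec_replace_namespace_dots_py; infer_instance

-- ===== CLAIM (what is proved, stated in full; the proofs are below) =====
def Claim_equal_replace_namespace_dots_py : Prop := ∀ (line : String), Dom_replace_namespace_dots_py line → Spec_replace_namespace_dots_py line (replace_namespace_dots_py line)

-- ===== LEMMAS AND PROOFS =====

theorem pvWordC_ne (c : Char) (h : pvWordC c = true) :
    c ≠ '/' ∧ c ≠ '"' ∧ c ≠ '\'' ∧ c ≠ '.' ∧ c ≠ '\\' := by
  refine ⟨?_, ?_, ?_, ?_, ?_⟩ <;> rintro rfl <;> exact absurd h (by decide)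

theorem pvALit_eq (q : Char) (cs : List Char) :
    pvALit q cs = (cs.take (pvBLitLen q cs), cs.drop (pvBLitLen q cs)) := by
  fun_induction pvALit q cs <;>
    rw [pvBLitLen.eq_def] <;>
    simp_all <;>
    (try rw [show ∀ k : Nat, 2 + k = (k + 1) + 1 from fun k => by omega]) <;>
    (try simp_all) <;>
    (try simp [Nat.add_comm])

theorem pvBTokenize_word (c : Char) (cs : List Char) (h : pvWordC c = true) :
    pvBTokenize (c :: cs) =
      .word ((c :: cs).takeWhile pvWordC) :: pvBTokenize ((c :: cs).dropWhile pvWordC) := by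
  obtain ⟨h1, h2, h3, -, -⟩ := pvWordC_ne c h
  rw [pvBTokenize]
  simp [h1, h2, h3, h]

theorem pvBTokenize_head_other (c : Char) (cs : List Char) (h : pvWordC c = false) :
    ∃ s ts, pvBTokenize (c :: cs) = .other s :: ts ∧ s.head? = some c := by
  rw [pvBTokenize]
  by_cases h1 : (c = '/' && cs.head? == some '/') = true
  · refine ⟨c :: cs, [], ?_, rfl⟩; simp [h1]
  · by_cases h2 : (c = '"' || c = '\'') = true
    · refine ⟨c :: cs.take (pvBLitLen c cs), pvBTokenize (cs.drop (pvBLitLen c cs)), ?_, rfl⟩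
      simp [h1, h2]
    · refine ⟨[c], pvBTokenize cs, ?_, rfl⟩; simp [h1, h2, h]

theorem pvBRewrite_word_eq (w : List Char) (ts : List PvTok) :
    pvBRewrite (.word w :: ts) =
      match ts with
      | .other ['.'] :: .word m :: ts' =>
        if pvHasUpper w && pvMemberOk m then w ++ [':', ':'] ++ pvBRewrite (.word m :: ts')
        else w ++ pvBRewrite ts
      | _ => w ++ pvBRewrite ts := by
  by_cases hP : ∀ (m : List Char) (ts' : List PvTok), ts = PvTok.other ['.'] :: PvTok.word m :: ts' → False
  · rw [pvBRewrite.eq_4 w ts hP]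
    split
    · next m ts' => exact absurd rfl (hP m ts')
    · rfl
  · have hex : ∃ m ts', ts = PvTok.other ['.'] :: PvTok.word m :: ts' :=
      Classical.byContradiction fun h2 => hP fun m ts' he => h2 ⟨m, ts', he⟩
    obtain ⟨m, ts', rfl⟩ := hex
    rw [pvBRewrite.eq_3]
    rfl

theorem pvBRewrite_word_nil (ts : List PvTok) :
    pvBRewrite (.word [] :: ts) = pvBRewrite ts := by
  rw [pvBRewrite_word_eq]
  split
  · next m ts' => simp [pvHasUpper, pvBRewrite]
  · simp

theorem pvBRewrite_word_cons (c : Char) (hc : pvUpper c = false) (w : List Char) (ts : List PvTok) :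
    pvBRewrite (.word (c :: w) :: ts) = c :: pvBRewrite (.word w :: ts) := by
  rw [pvBRewrite_word_eq, pvBRewrite_word_eq]
  split
  · next m ts' =>
      simp only [pvHasUpper, List.any_cons, hc, Bool.false_or]
      split <;> simp [pvHasUpper]
  · simp


theorem pvWordC_of_alpha_us (c : Char) (h : (pvAlpha c || decide (c = '_')) = true) :
    pvWordC c = true := by
  rcases Bool.or_eq_true_iff.mp h with h' | h'
  · simp [pvWordC, pvAlnum, h']
  · simp [pvWordC, of_decide_eq_true h']

theorem pv_dropWhile_head (p : Char → Bool) (l : List Char) (a : Char) (tl : List Char)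
    (h : List.dropWhile p l = a :: tl) : p a = false := by
  induction l with
  | nil => simp [List.dropWhile] at h
  | cons c cs ih =>
    by_cases hc : p c = true
    · rw [List.dropWhile_cons_of_pos hc] at h; exact ih h
    · have hc' : p c = false := by cases hpc : p c; rfl; exact absurd hpc hc
      rw [List.dropWhile_cons_of_neg (by simp [hc'])] at h
      cases h; exact hc'

theorem pvBTokenize_dot (xs : List Char) :
    pvBTokenize ('.' :: xs) = .other ['.'] :: pvBTokenize xs := by
  rw [pvBTokenize.eq_2]
  simp [show pvWordC '.' = false from by decide]

theorem pv_tok_tail (rest : List Char) :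
    pvBRewrite (.word (List.takeWhile pvWordC rest) :: pvBTokenize (List.dropWhile pvWordC rest))
      = pvBRewrite (pvBTokenize rest) := by
  cases rest with
  | nil => simp [pvBTokenize.eq_1, List.takeWhile, List.dropWhile, pvBRewrite_word_nil]
  | cons r rs =>
    by_cases hr : pvWordC r = true
    · rw [pvBTokenize_word r rs hr]
    · have hr' : pvWordC r = false := by cases h : pvWordC r; rfl; exact absurd h hr
      rw [List.takeWhile_cons_of_neg (by simp [hr']), List.dropWhile_cons_of_neg (by simp [hr'])]
      exact pvBRewrite_word_nil _

theorem pv_main_aux : ∀ (n : Nat) (cs : List Char), cs.length ≤ n →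
    pvAGo cs = pvBRewrite (pvBTokenize cs) := by
  intro n
  induction n with
  | zero =>
    intro cs h
    have h0 : cs = [] := by cases cs <;> simp_all
    subst h0
    rw [pvAGo.eq_1, pvBTokenize.eq_1, pvBRewrite.eq_1]
  | succ n ih =>
    intro cs hlen
    cases cs with
    | nil => rw [pvAGo.eq_1, pvBTokenize.eq_1, pvBRewrite.eq_1]
    | cons ch rest =>
      have hrl : rest.length ≤ n := by simp at hlen; omega
      rw [pvAGo.eq_2, pvBTokenize.eq_2]
      by_cases hcom : (decide (ch = '/') && rest.head? == some '/') = true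
      · rw [if_pos hcom, if_pos hcom, pvBRewrite.eq_2, pvBRewrite.eq_1]
        try simp
      · rw [if_neg hcom, if_neg hcom]
        by_cases hq : (decide (ch = '"') || decide (ch = '\'')) = true
        · rw [if_pos hq, if_pos hq, pvBRewrite.eq_2, pvALit_eq]
          have hle : (List.drop (pvBLitLen ch rest) rest).length ≤ n := by
            have := List.length_drop (l := rest) (i := pvBLitLen ch rest)
            omega
          rw [ih _ hle]
          try simp
        · rw [if_neg hq, if_neg hq]
          by_cases hup : pvUpper ch = true
          · rw [dif_pos hup]
            have hw : pvWordC ch = true := pvUpper_wordC ch hup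
            rw [dif_pos hw]
            have hupw : pvHasUpper (List.takeWhile pvWordC (ch :: rest)) = true := by
              rw [List.takeWhile_cons_of_pos hw]; simp [pvHasUpper, hup]
            have hdlen : (List.dropWhile pvWordC (ch :: rest)).length ≤ rest.length :=
              pv_drop_le ch rest hw
            split
            · next m1 ms heq =>
              have hlenm : (m1 :: ms).length ≤ n := by
                rw [heq] at hdlen; simp at hdlen; simp; omega
              have hlenafter : ('.' :: m1 :: ms).length ≤ n := by
                rw [heq] at hdlen; simp at hdlen ⊢; omega
              rw [heq]
              by_cases halpha : (pvAlpha m1 || decide (m1 = '_')) = true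
              · have hm1w : pvWordC m1 = true := pvWordC_of_alpha_us m1 halpha
                have hmem_head : (List.takeWhile pvWordC (m1 :: ms)).headD ' ' = m1 := by
                  rw [List.takeWhile_cons_of_pos hm1w]; rfl
                rw [if_pos halpha, pvBTokenize_dot, pvBTokenize_word m1 ms hm1w,
                  pvBRewrite.eq_3]
                by_cases hmem : (!(List.takeWhile pvWordC (m1 :: ms)).contains '_'
                    || pvUpper ((List.takeWhile pvWordC (m1 :: ms)).headD ' ')) = true
                · rw [if_pos hmem]
                  have hcond : (pvHasUpper (List.takeWhile pvWordC (ch :: rest)) &&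
                      pvMemberOk (List.takeWhile pvWordC (m1 :: ms))) = true := by
                    have hmem' := hmem
                    rw [hmem_head] at hmem'
                    rw [pvMemberOk, hupw, hmem_head, halpha, hmem']
                    rfl
                  rw [if_pos hcond]
                  rw [← pvBTokenize_word m1 ms hm1w, ← ih _ hlenm]
                · rw [if_neg hmem]
                  have hcond : ¬ (pvHasUpper (List.takeWhile pvWordC (ch :: rest)) &&
                      pvMemberOk (List.takeWhile pvWordC (m1 :: ms))) = true := by
                    have hmemb : (!(List.takeWhile pvWordC (m1 :: ms)).contains '_'
                        || pvUpper ((List.takeWhile pvWordC (m1 :: ms)).headD ' ')) = false :=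
                      Bool.eq_false_iff.mpr hmem
                    rw [pvMemberOk, hmemb]
                    simp
                  rw [if_neg hcond, ← pvBTokenize_word m1 ms hm1w, ← pvBTokenize_dot,
                    ← ih _ hlenafter]
              · rw [if_neg halpha]
                by_cases hm1w : pvWordC m1 = true
                · have hmem_head : (List.takeWhile pvWordC (m1 :: ms)).headD ' ' = m1 := by
                    rw [List.takeWhile_cons_of_pos hm1w]; rfl
                  rw [pvBTokenize_dot, pvBTokenize_word m1 ms hm1w, pvBRewrite.eq_3]
                  have hcond : ¬ (pvHasUpper (List.takeWhile pvWordC (ch :: rest)) &&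
                      pvMemberOk (List.takeWhile pvWordC (m1 :: ms))) = true := by
                    have halphab : (pvAlpha m1 || decide (m1 = '_')) = false :=
                      Bool.eq_false_iff.mpr halpha
                    rw [pvMemberOk, hmem_head, halphab]
                    simp
                  rw [if_neg hcond, ← pvBTokenize_word m1 ms hm1w, ← pvBTokenize_dot,
                    ← ih _ hlenafter]
                · have hm1' : pvWordC m1 = false := by
                    cases h : pvWordC m1; rfl; exact absurd h hm1w
                  obtain ⟨s, ts2, hts, hshead⟩ := pvBTokenize_head_other m1 ms hm1'
                  rw [pvBTokenize_dot, hts,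
                    pvBRewrite.eq_4 _ _ (fun m ts' he => by simp at he)]
                  rw [← hts, ← pvBTokenize_dot, ← ih _ hlenafter]
            · next hA =>
              rcases hx : List.dropWhile pvWordC (ch :: rest) with _ | ⟨a, tl⟩
              · rw [pvBTokenize.eq_1,
                  pvBRewrite.eq_4 _ _ (fun m ts' he => by simp at he),
                  pvAGo.eq_1, pvBRewrite.eq_1]
              · rw [hx] at hA hdlen
                have hlena : (a :: tl).length ≤ n := by
                  simp at hdlen ⊢; omega
                have hana : pvWordC a = false := pv_dropWhile_head _ _ _ _ hx
                by_cases hadot : a = '.'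
                · subst hadot
                  cases tl with
                  | nil =>
                    rw [pvBTokenize_dot, pvBTokenize.eq_1,
                      pvBRewrite.eq_4 _ _ (fun m ts' he => by simp at he),
                      ← pvBTokenize.eq_1, ← pvBTokenize_dot, ← ih _ hlena]
                  | cons m1 ms => exact absurd rfl (hA m1 ms)
                · obtain ⟨s, ts2, hts, hshead⟩ := pvBTokenize_head_other a tl (by simp [hana])
                  rw [hts, pvBRewrite.eq_4 _ _ (fun m ts' he => by
                    have h1 : s = ['.'] := by
                      have h2 := (List.cons.injEq _ _ _ _).mp he
                      cases h2.1; rfl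
                    rw [h1] at hshead
                    simp at hshead
                    exact hadot hshead.symm)]
                  rw [← hts, ← ih _ hlena]
          · rw [dif_neg hup]
            by_cases hw : pvWordC ch = true
            · rw [dif_pos hw]
              rw [List.takeWhile_cons_of_pos hw, List.dropWhile_cons_of_pos hw]
              rw [pvBRewrite_word_cons ch (by cases h : pvUpper ch; rfl; exact absurd h hup) _ _]
              rw [pv_tok_tail, ← ih _ hrl]
            · rw [dif_neg hw, pvBRewrite.eq_2, ← ih _ hrl]
              try simp

theorem pv_main (cs : List Char) : pvAGo cs = pvBRewrite (pvBTokenize cs) :=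
  pv_main_aux cs.length cs (Nat.le_refl _)

-- ===== VERDICT (by name: the statement is the Claim_ definition above) =====
theorem replace_namespace_dots_py_spec : Claim_equal_replace_namespace_dots_py := by
  intro line _
  unfold Spec_replace_namespace_dots_py replace_namespace_dots_py replace_namespace_dots_py_alt
  rw [pv_main]
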